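-- pv_equiv track=rewrite | github.com/cherie-lou/lrg_LocationCorrector | LocationCorrector.py | replace_diffseq_addresses
-- ===== SOURCE A (Python) =====
-- from collections import Counter
--
-- def normalize_address(address):
--     return ' '.join(sorted(address.split()))
--
-- def replace_diffseq_addresses(addresses):
--     normalized_addresses = [normalize_address(address) for address in addresses]
--     address_counts = Counter(normalized_addresses)
--     result = []
--     for address in addresses:
--         normalized_address = normalize_address(address)
--         if address_counts[normalized_address] > 1:
--             most_common = max(
--                 (addr for addr in addresses if normalize_address(addr) == normalized_address),
--                 key=addresses.count
--             )
--             result.append(most_common)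
--         else:
--             result.append(address)
--
--     return result
-- ===== SOURCE B (Python) =====
-- from collections import Counter
--
-- def normalize_address(address):
--     return ' '.join(sorted(address.split()))
--
-- def replace_diffseq_addresses(addresses):
--     norms = [normalize_address(a) for a in addresses]
--     group_counts = Counter(norms)
--     orig_counts = Counter(addresses)
--     best = {}
--     for a, n in zip(addresses, norms):
--         c = orig_counts[a]
--         if n not in best or c > best[n][0]:
--             best[n] = (c, a)
--     return [best[n][1] if group_counts[n] > 1 else a
--             for a, n in zip(addresses, norms)]
-- ===== Notes on version B (the rewrite author's own statement) =====
-- stated objective: faster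
-- what changed: Instead of rescanning the whole list inside every iteration (a max over a filtered generator whose key itself is a full list.count scan), B precomputes two Counters and builds the normalized-group -> (count, representative) map in a single left-to-right pass with the same strict-improvement (first-max) tie-break, then emits the result with one lookup per element.
import Mathlib
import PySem

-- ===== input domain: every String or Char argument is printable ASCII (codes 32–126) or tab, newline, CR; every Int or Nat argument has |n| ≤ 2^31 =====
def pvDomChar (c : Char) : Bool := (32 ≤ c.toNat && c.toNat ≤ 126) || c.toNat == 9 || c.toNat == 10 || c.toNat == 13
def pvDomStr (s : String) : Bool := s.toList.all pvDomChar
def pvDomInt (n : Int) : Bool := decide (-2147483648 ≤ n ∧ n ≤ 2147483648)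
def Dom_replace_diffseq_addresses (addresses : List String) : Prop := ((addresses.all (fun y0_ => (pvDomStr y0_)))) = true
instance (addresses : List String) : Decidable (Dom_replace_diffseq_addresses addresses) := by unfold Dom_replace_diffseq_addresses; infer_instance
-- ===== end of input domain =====

-- B replaces A's per-element rescans (a full count-scan inside a max-scan inside the main loop)
-- by two Counters and one left-to-right pass building a normalized-group → (count, best original)
-- map with the same strict-improvement (first-max) tie-break; objective: faster (asymptotic).

-- ===== PORT A =====
-- shared helper: both Pythons define the identical normalize_address
def normalize_address (address : String) : String :=
  PySem.Str.join " " (PySem.List.sorted (PySem.Str.split₀ address) (fun x => x) false)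

def replace_diffseq_addresses (addresses : List String) : List String :=
  let normalized_addresses := addresses.map (fun address => normalize_address address)
  let address_counts := PySem.Dict.counter normalized_addresses
  addresses.foldl (fun result address =>
    let normalized_address := normalize_address address
    if address_counts.getD normalized_address 0 > 1 then
      -- Python's max over the filtered generator (nonempty under the > 1 guard), key = addresses.count
      match PySem.List.max?
          (addresses.filter (fun addr => normalize_address addr == normalized_address))
          (fun addr => (addresses.count addr : Int)) with
      | some most_common => result ++ [most_common]
      | none => result   -- unreachable: the > 1 guard makes the filtered list nonempty
    else result ++ [address]) []

-- ===== PORT B =====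
def replace_diffseq_addresses_alt (addresses : List String) : List String :=
  let norms := addresses.map (fun a => normalize_address a)
  let group_counts := PySem.Dict.counter norms
  let orig_counts := PySem.Dict.counter addresses
  let best : PySem.Dict String (Int × String) :=
    (addresses.zip norms).foldl (fun best p =>
      let c := orig_counts.getD p.1 0
      match best.get? p.2 with
      | none => best.insert p.2 (c, p.1)
      | some q => if c > q.1 then best.insert p.2 (c, p.1) else best)
      PySem.Dict.empty
  (addresses.zip norms).map (fun p =>
    if group_counts.getD p.2 0 > 1 then (best.getD p.2 (0, p.1)).2 else p.1)

-- ===== PRECONDITION & SPEC =====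
def Spec_replace_diffseq_addresses (addresses : List String) (out : List String) : Prop := out = replace_diffseq_addresses_alt addresses
instance (addresses : List String) (out : List String) : Decidable (Spec_replace_diffseq_addresses addresses out) := by unfold Spec_replace_diffseq_addresses; infer_instance

-- ===== CLAIM (what is proved, stated in full; the proofs are below) =====
def Claim_equal_replace_diffseq_addresses : Prop := ∀ (addresses : List String), Dom_replace_diffseq_addresses addresses → Spec_replace_diffseq_addresses addresses (replace_diffseq_addresses addresses)

-- ===== LEMMAS AND PROOFS =====

-- the strict-improvement step both programs use (A via PySem.List.max?, B via the dict fold)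
def pbStep (cnt : String → Int) (o : Option (Int × String)) (a : String) : Option (Int × String) :=
  match o with
  | none => some (cnt a, a)
  | some q => if cnt a > q.1 then some (cnt a, a) else o

-- B's dict fold, looked up at one key n, is the pbStep-fold over the elements whose norm is n
theorem best_get (f : String → String) (cnt : String → Int) (xs : List String)
    (d : PySem.Dict String (Int × String)) (n : String) :
    ((xs.foldl (fun best a =>
        match best.get? (f a) with
        | none => best.insert (f a) (cnt a, a)
        | some q => if cnt a > q.1 then best.insert (f a) (cnt a, a) else best) d).get? n)
      = (xs.filter (fun a => f a == n)).foldl (pbStep cnt) (d.get? n) := by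
  induction xs generalizing d with
  | nil => simp
  | cons x t ih =>
    simp only [List.foldl_cons, List.filter_cons]
    by_cases hx : f x = n
    · subst hx
      simp only [beq_self_eq_true, if_pos, List.foldl_cons]
      rw [ih]
      cases hgd : d.get? (f x) with
      | none => simp [pbStep, PySem.Dict.get?_insert_self]
      | some q =>
        by_cases hc : cnt x > q.1
        · simp [pbStep, hc, PySem.Dict.get?_insert_self]
        · simp [pbStep, hgd, hc]
    · have hbeq : (f x == n) = false := by simp [hx]
      simp only [hbeq, Bool.false_eq_true, if_false]
      rw [ih]
      cases hgd : d.get? (f x) with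
      | none => simp [PySem.Dict.get?_insert_of_ne _ _ (fun h => hx h.symm)]
      | some q =>
        by_cases hc : cnt x > q.1
        · simp [hc, PySem.Dict.get?_insert_of_ne _ _ (fun h => hx h.symm)]
        · simp [hc]

-- the pbStep-fold is Python's max (PySem.List.max?) paired with its key
def maxStep (cnt : String → Int) (acc : Option String) (x : String) : Option String :=
  acc.elim (some x) (fun m => if cnt m < cnt x then some x else some m)

theorem max?_eq_fold (cnt : String → Int) (ys : List String) :
    PySem.List.max? ys cnt = ys.foldl (maxStep cnt) none := by
  unfold PySem.List.max?
  exact PySem.List.foldl_congr_mem ys _ _ none (fun acc x _ => by cases acc <;> rfl)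

theorem pb_max (cnt : String → Int) (ys : List String) (o : Option String) :
    ys.foldl (pbStep cnt) (Option.map (fun a => (cnt a, a)) o)
      = Option.map (fun a => (cnt a, a)) (ys.foldl (maxStep cnt) o) := by
  induction ys generalizing o with
  | nil => rfl
  | cons y t ih =>
    cases o with
    | none => simpa [pbStep, maxStep] using ih (some y)
    | some m =>
      by_cases hc : cnt m < cnt y
      · simpa [pbStep, maxStep, hc] using ih (some y)
      · simpa [pbStep, maxStep, hc] using ih (some m)

theorem zip_map_self {α β : Type} (f : α → β) (l : List α) :
    l.zip (l.map f) = l.map (fun a => (a, f a)) := by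
  induction l with
  | nil => rfl
  | cons x t ih => simp [ih]

-- the element A's loop body appends for an input element a (total: 'a' in the unreachable none case)
def aOutF (L : List String) (a : String) : String :=
  if (PySem.Dict.counter (L.map (fun x => normalize_address x))).getD (normalize_address a) 0 > 1 then
    match PySem.List.max? (L.filter (fun addr => normalize_address addr == normalize_address a))
        (fun addr => (L.count addr : Int)) with
    | some m => m
    | none => a
  else a

theorem filter_norm_ne_nil (L : List String) (a : String) (ha : a ∈ L) :
    L.filter (fun addr => normalize_address addr == normalize_address a) ≠ [] := by
  intro hnil
  have : a ∈ L.filter (fun addr => normalize_address addr == normalize_address a) := by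
    simp [List.mem_filter, ha]
  simp [hnil] at this

-- A's loop body always appends exactly aOutF L a (the > 1 guard keeps the filtered list nonempty)
theorem bodyA_eq (L : List String) (acc : List String) (a : String) (ha : a ∈ L) :
    (if (PySem.Dict.counter (L.map (fun x => normalize_address x))).getD (normalize_address a) 0 > 1 then
      match PySem.List.max? (L.filter (fun addr => normalize_address addr == normalize_address a))
          (fun addr => (L.count addr : Int)) with
      | some m => acc ++ [m]
      | none => acc
    else acc ++ [a]) = acc ++ [aOutF L a] := by
  cases hm : PySem.List.max? (L.filter (fun addr => normalize_address addr == normalize_address a))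
      (fun addr => (L.count addr : Int)) with
  | none => exact absurd ((PySem.List.max?_eq_none_iff _ _).mp hm) (filter_norm_ne_nil L a ha)
  | some m =>
    by_cases hcond : (PySem.Dict.counter (L.map (fun x => normalize_address x))).getD (normalize_address a) 0 > 1
    · simp only [aOutF, hm, if_pos hcond]
    · simp only [aOutF, if_neg hcond]

-- per element, A's appended value equals B's mapped value
theorem elem_eq (L : List String) (a : String) (ha : a ∈ L) :
    aOutF L a =
      (if (PySem.Dict.counter (L.map (fun x => normalize_address x))).getD (normalize_address a) 0 > 1 then
        ((L.foldl (fun best y =>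
            match best.get? (normalize_address y) with
            | none => best.insert (normalize_address y) ((PySem.Dict.counter L).getD y 0, y)
            | some q => if (PySem.Dict.counter L).getD y 0 > q.1 then
                best.insert (normalize_address y) ((PySem.Dict.counter L).getD y 0, y)
              else best) PySem.Dict.empty).getD (normalize_address a) (0, a)).2
      else a) := by
  by_cases hcond : (PySem.Dict.counter (L.map (fun x => normalize_address x))).getD (normalize_address a) 0 > 1
  · simp only [aOutF, if_pos hcond]
    rw [PySem.Dict.getD,
      best_get normalize_address (fun y => (PySem.Dict.counter L).getD y 0) L PySem.Dict.empty
        (normalize_address a),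
      PySem.Dict.get?_empty]
    have hcnt : (fun y => (PySem.Dict.counter L).getD y 0) = (fun y => ((L.count y : Int))) := by
      funext y; exact PySem.Dict.getD_counter L y
    rw [hcnt]
    have hpb := pb_max (fun y => ((L.count y : Int)))
      (L.filter (fun addr => normalize_address addr == normalize_address a)) none
    simp only [Option.map_none] at hpb
    rw [hpb, ← max?_eq_fold]
    cases hm : PySem.List.max? (L.filter (fun addr => normalize_address addr == normalize_address a))
        (fun addr => (L.count addr : Int)) with
    | none => exact absurd ((PySem.List.max?_eq_none_iff _ _).mp hm) (filter_norm_ne_nil L a ha)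
    | some m => rfl
  · simp only [aOutF, if_neg hcond]

-- ===== VERDICT (by name: the statement is the Claim_ definition above) =====
theorem replace_diffseq_addresses_spec : Claim_equal_replace_diffseq_addresses := by
  intro L _
  unfold Spec_replace_diffseq_addresses replace_diffseq_addresses replace_diffseq_addresses_alt
  simp only [zip_map_self, List.foldl_map, List.map_map, Function.comp_def]
  rw [PySem.List.foldl_congr_mem' L _ (fun acc a => acc ++ [aOutF L a]) []
        (fun a ha acc => bodyA_eq L acc a ha),
      PySem.List.foldl_append_singleton_eq_map]
  simp only [List.nil_append]
  exact List.map_congr_left (fun a ha => elem_eq L a ha)
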